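-- pv_equiv track=rewrite | github.com/yoiiii121/MC_subject | barcode_detection_recognition.py | read_lguard
-- ===== SOURCE A (Python) =====
-- space = 0
--
-- bar = 255
--
-- def read_lguard(image, x, y):
--
--     widths = [ 0, 0, 0 ]
--     pattern = [bar, space, bar ]
--     for i in range(0,len(pattern)):
--         while (image[y][x] == pattern[i]):
--             x +=1
--             widths[i] +=1
--     return (x, widths[0])
-- ===== SOURCE B (Python) =====
-- space = 0
--
-- bar = 255
--
-- def read_lguard(image, x, y):
--     # Run-length encode the pixels from x to the row's end, then consume the
--     # bar/space/bar guard pattern run by run instead of scanning pixel by pixel.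
--     seq = image[y][x:]
--     runs = []
--     for v in seq:
--         if runs and runs[-1][0] == v:
--             runs[-1] = (v, runs[-1][1] + 1)
--         else:
--             runs.append((v, 1))
--     k = 0
--     pos = x
--     first = 0
--     for i, expected in enumerate((bar, space, bar)):
--         if k < len(runs) and runs[k][0] == expected:
--             if i == 0:
--                 first = runs[k][1]
--             pos += runs[k][1]
--             k += 1
--     return (pos, first)
-- ===== Notes on version B (the rewrite author's own statement) =====
-- stated objective: alternative
-- what changed: B slices the row once, builds a run-length encoding of it in one pass, and then consumes the bar/space/bar guard pattern run by run from that encoding, instead of A's table-driven per-pixel while-loops with a widths accumulator; the returned width is the first run's stored length.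
-- intended difference: On a negative start x whose matching scan runs past the row's end, A's Python negative indexing silently wraps around and keeps scanning from the row's start (returning a position/width glued from both ends of the row), while B stops at the row's end, which is the intended behaviour for a left-to-right guard scan; e.g. on ([[0, 7, 255]], -1, 0) A returns (1, 1) and B returns (0, 1). — e.g. on read_lguard([[0, 7, 255]], -1, 0): A returns (1, 1), B returns (0, 1)
import Mathlib
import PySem

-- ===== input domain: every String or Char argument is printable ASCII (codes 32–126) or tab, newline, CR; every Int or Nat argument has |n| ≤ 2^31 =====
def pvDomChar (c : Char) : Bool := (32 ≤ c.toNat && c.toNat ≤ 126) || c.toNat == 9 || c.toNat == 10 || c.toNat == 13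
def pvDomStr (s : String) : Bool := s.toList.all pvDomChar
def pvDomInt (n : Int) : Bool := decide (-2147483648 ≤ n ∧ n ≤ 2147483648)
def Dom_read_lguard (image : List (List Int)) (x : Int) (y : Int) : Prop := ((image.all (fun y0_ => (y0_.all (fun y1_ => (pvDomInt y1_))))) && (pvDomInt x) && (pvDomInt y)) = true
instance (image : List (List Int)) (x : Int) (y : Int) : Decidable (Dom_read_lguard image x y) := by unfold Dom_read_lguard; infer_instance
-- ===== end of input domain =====

-- B replaces A's per-pixel triple scan (pattern/widths tables) by run-length encoding the row
-- suffix once and consuming the bar/space/bar pattern run by run (objective: alternative);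
-- on negative x whose scan would wrap past the row's end, B intentionally stops at the end (D_ below).


-- ===== PORT A =====
-- inner 'while image[y][x] == pattern[i]: x += 1; widths[i] += 1'
-- (pyGet? = none means the Python raised IndexError; those inputs are outside Pre_)
def pvWhileA (image : List (List Int)) (y : Int) (p : Int) (x : Int) (w : Int) : Int × Int :=
  match h : (PySem.List.pyGet? image y).bind (fun row => PySem.List.pyGet? row x) with
  | some q => if q = p then pvWhileA image y p (x + 1) (w + 1) else (x, w)
  | none => (x, w)
termination_by (((PySem.List.pyGet? image y).getD []).length - x).toNat
decreasing_by
  cases hy : PySem.List.pyGet? image y with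
  | none => simp [hy] at h
  | some row =>
    simp only [hy, Option.bind_some] at h
    have hx : ¬ (PySem.List.pyGet? row x = none) := by simp [h]
    rw [PySem.List.pyGet?_eq_none_iff] at hx
    have := not_not.mp hx
    simp only [Option.getD_some]
    unfold PySem.Raise.InRange at this
    omega

def read_lguard (image : List (List Int)) (x : Int) (y : Int) : Int × Int :=
  let widths : List Int := [0, 0, 0]
  let pattern : List Int := [255, 0, 255]
  let st := (PySem.List.pyRange 0 (pattern.length : Int) 1).foldl
    (fun (s : Int × List Int) i =>
      let r := pvWhileA image y (PySem.List.pyGetD pattern i 0) s.1 (PySem.List.pyGetD s.2 i 0)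
      (r.1, PySem.List.pySetD s.2 i r.2))
    (x, widths)
  (st.1, PySem.List.pyGetD st.2 0 0)

-- ===== PORT B =====
-- 'if runs and runs[-1][0] == v: runs[-1] = (v, runs[-1][1] + 1) else: runs.append((v, 1))'
def pvRleF (runs : List (Int × Int)) (v : Int) : List (Int × Int) :=
  match runs.getLast? with
  | some (u, c) => if u = v then runs.dropLast ++ [(v, c + 1)] else runs ++ [(v, 1)]
  | none => runs ++ [(v, 1)]

-- the 'for v in seq' run-length-encoding loop of Source B
def pvRle (seq : List Int) : List (Int × Int) := seq.foldl pvRleF []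

-- one iteration of Source B's 'for i, expected in enumerate((bar, space, bar))' loop; state = (k, pos, first)
def pvConsume (runs : List (Int × Int)) (s : Nat × Int × Int) (p : Int × Int) : Nat × Int × Int :=
  if s.1 < runs.length ∧ (runs.getD s.1 (0, 0)).1 = p.2 then
    (s.1 + 1, s.2.1 + (runs.getD s.1 (0, 0)).2,
     if p.1 = 0 then (runs.getD s.1 (0, 0)).2 else s.2.2)
  else s

def read_lguard_alt (image : List (List Int)) (x : Int) (y : Int) : Int × Int :=
  -- image[y] (none = IndexError, outside Pre_), then seq = row[x:]
  let seq := PySem.List.slice ((PySem.List.pyGet? image y).getD []) (some x) none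
  let runs := pvRle seq
  let st := (PySem.List.enumerate [(255 : Int), 0, 255] 0).foldl (pvConsume runs) (0, x, 0)
  (st.2.1, st.2.2)

-- ===== PRECONDITION & SPEC =====
-- Pre_ excludes exactly the inputs where Python A raises IndexError: y (or the starting x) out of
-- range, or the scan — reading positions x, x+1, … with Python's negative-index wraparound, i.e.
-- positions x + len(row) … of row ++ row — runs off the end of the row while still matching.
def Pre_read_lguard (image : List (List Int)) (x : Int) (y : Int) : Prop :=
  PySem.Raise.InRange image.length y ∧
  PySem.Raise.InRange ((PySem.List.pyGet? image y).getD []).length x ∧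
  (((((((PySem.List.pyGet? image y).getD []) ++ ((PySem.List.pyGet? image y).getD [])).drop
      (x + (((PySem.List.pyGet? image y).getD []).length : Int)).toNat).dropWhile
      (· == (255 : Int))).dropWhile (· == (0 : Int))).dropWhile (· == (255 : Int))) ≠ []
instance (image : List (List Int)) (x : Int) (y : Int) : Decidable (Pre_read_lguard image x y) := by unfold Pre_read_lguard; infer_instance
def pvWitness_read_lguard : List (List Int) × Int × Int := ([[255, 0, 255, 7]], 0, 0)

-- On a negative start x whose matching scan crosses the end of the row, A's Python negative
-- indexing silently wraps around and keeps scanning from the row's start, returning a position and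
-- width taken from two glued-together ends of the row; B stops scanning at the row's end, which is
-- the intended behaviour for a guard scan.
def D_read_lguard (image : List (List Int)) (x : Int) (y : Int) : Prop :=
  x < 0 ∧ PySem.Raise.InRange image.length y ∧
  (let row := (PySem.List.pyGet? image y).getD []
   PySem.Raise.InRange row.length x ∧
   (((((row ++ row).drop (x + (row.length : Int)).toNat).dropWhile (· == (255 : Int))).dropWhile
       (· == (0 : Int))).dropWhile (· == (255 : Int))).length < row.length)
instance (image : List (List Int)) (x : Int) (y : Int) : Decidable (D_read_lguard image x y) := by unfold D_read_lguard; infer_instance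

def Spec_read_lguard (image : List (List Int)) (x : Int) (y : Int) (out : Int × Int) : Prop := ¬ D_read_lguard image x y → out = read_lguard_alt image x y
instance (image : List (List Int)) (x : Int) (y : Int) (out : Int × Int) : Decidable (Spec_read_lguard image x y out) := by unfold Spec_read_lguard; infer_instance

def pvDiffWitness_read_lguard : List (List Int) × Int × Int := ([[0, 7, 255]], -1, 0)
def pvDiffWitnessOut_read_lguard : (Int × Int) × (Int × Int) := ((1, 1), (0, 1))

-- ===== CLAIM (what is proved, stated in full; the proofs are below) =====
def Claim_unchanged_read_lguard : Prop := ∀ (image : List (List Int)) (x : Int) (y : Int), Dom_read_lguard image x y → Pre_read_lguard image x y → Spec_read_lguard image x y (read_lguard image x y)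
def Claim_changed_read_lguard : Prop := Dom_read_lguard (pvDiffWitness_read_lguard.1) (pvDiffWitness_read_lguard.2.1) (pvDiffWitness_read_lguard.2.2) ∧ Pre_read_lguard (pvDiffWitness_read_lguard.1) (pvDiffWitness_read_lguard.2.1) (pvDiffWitness_read_lguard.2.2) ∧ D_read_lguard (pvDiffWitness_read_lguard.1) (pvDiffWitness_read_lguard.2.1) (pvDiffWitness_read_lguard.2.2) ∧ read_lguard (pvDiffWitness_read_lguard.1) (pvDiffWitness_read_lguard.2.1) (pvDiffWitness_read_lguard.2.2) = pvDiffWitnessOut_read_lguard.1 ∧ read_lguard_alt (pvDiffWitness_read_lguard.1) (pvDiffWitness_read_lguard.2.1) (pvDiffWitness_read_lguard.2.2) = pvDiffWitnessOut_read_lguard.2 ∧ pvDiffWitnessOut_read_lguard.1 ≠ pvDiffWitnessOut_read_lguard.2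
def Claim_exact_read_lguard : Prop := ∀ (image : List (List Int)) (x : Int) (y : Int), Dom_read_lguard image x y → Pre_read_lguard image x y → D_read_lguard image x y → read_lguard image x y ≠ read_lguard_alt image x y

-- ===== LEMMAS AND PROOFS =====

-- the raw pixel sequence A's wrapped scan walks over, and B's slice
def pvD (row : List Int) (x : Int) : List Int :=
  (row ++ row).drop (x + (row.length : Int)).toNat

-- stage-width and stage-remainder abbreviations
def pvTW (v : Int) (l : List Int) : List Int := l.takeWhile (· == v)
def pvDW (v : Int) (l : List Int) : List Int := l.dropWhile (· == v)

-- -------- A-side characterization --------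

theorem pvBindGet (image : List (List Int)) (y x : Int) :
    (PySem.List.pyGet? image y).bind (fun row => PySem.List.pyGet? row x)
      = PySem.List.pyGet? ((PySem.List.pyGet? image y).getD []) x := by
  cases h : PySem.List.pyGet? image y with
  | none =>
    simp only [Option.bind_none, Option.getD_none]
    symm
    rw [PySem.List.pyGet?_eq_none_iff]
    unfold PySem.Raise.InRange
    simp
  | some row => simp

-- 'while row[x] == v: x += 1' returning the final x (reference form of A's inner loop)
def pvScan (row : List Int) (v : Int) (x : Int) : Int :=
  match h : PySem.List.pyGet? row x with
  | some q => if q = v then pvScan row v (x + 1) else x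
  | none => x
termination_by (row.length - x).toNat
decreasing_by
  have hx : ¬ (PySem.List.pyGet? row x = none) := by simp [h]
  rw [PySem.List.pyGet?_eq_none_iff] at hx
  have := not_not.mp hx
  unfold PySem.Raise.InRange at this
  omega

theorem pvScan_next (row : List Int) (v x : Int)
    (h : PySem.List.pyGet? row x = some v) : pvScan row v x = pvScan row v (x + 1) := by
  rw [pvScan]
  split
  · next q hq =>
      rw [h] at hq
      cases hq
      simp
  · next hn => rw [h] at hn; cases hn

theorem pvScan_stop (row : List Int) (v x : Int)
    (h : PySem.List.pyGet? row x ≠ some v) : pvScan row v x = x := by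
  rw [pvScan]
  split
  · next q hq =>
      rw [if_neg]
      intro e
      exact h (by rw [hq, e])
  · next hn => rfl

theorem pvWhileA_eq_scan (image : List (List Int)) (y p x w : Int) :
    pvWhileA image y p x w
      = (pvScan ((PySem.List.pyGet? image y).getD []) p x,
         w + (pvScan ((PySem.List.pyGet? image y).getD []) p x - x)) := by
  fun_induction pvWhileA image y p x w with
  | case1 x w h ih =>
    rw [pvBindGet] at h
    rw [pvScan_next _ _ _ h, ih]
    exact Prod.ext rfl (by omega)
  | case2 x w q h hq =>
    rw [pvBindGet] at h
    rw [pvScan_stop _ _ _ (by rw [h]; simpa using hq)]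
    exact Prod.ext rfl (by omega)
  | case3 x w h =>
    rw [pvBindGet] at h
    rw [pvScan_stop _ _ _ (by rw [h]; simp)]
    exact Prod.ext rfl (by omega)

-- A's value in terms of three reference scans
theorem pvA_scan (image : List (List Int)) (x y : Int) :
    read_lguard image x y
      = (pvScan ((PySem.List.pyGet? image y).getD []) 255
          (pvScan ((PySem.List.pyGet? image y).getD []) 0
            (pvScan ((PySem.List.pyGet? image y).getD []) 255 x)),
         pvScan ((PySem.List.pyGet? image y).getD []) 255 x - x) := by
  unfold read_lguard
  have hr : PySem.List.pyRange 0 ((3 : Nat) : Int) 1 = [0, 1, 2] := by decide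
  simp only [List.length_cons, List.length_nil, hr, List.foldl_cons, List.foldl_nil,
    pvWhileA_eq_scan]
  simp [PySem.List.pyGetD, PySem.List.pySetD, PySem.List.pySet?, PySem.List.pyGet?,
    PySem.List.pyIdx?]

-- pixel correspondence: A's wrapped indexing reads exactly the doubled-suffix pvD
theorem pvGet_shift (row : List Int) (x : Int)
    (hx : PySem.Raise.InRange row.length x) (i : Nat) :
    PySem.List.pyGet? row (x + (i : Int)) = (pvD row x)[i]? := by
  obtain ⟨h1, h2⟩ := hx
  unfold pvD
  have hm : ((x + (row.length : Int)).toNat : Int) = x + row.length := by omega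
  rw [List.getElem?_drop]
  by_cases hi : 0 ≤ x + (i : Int)
  · rw [PySem.List.pyGet?_of_nonneg _ hi]
    by_cases hlt : x + (i : Int) < (row.length : Int)
    · rw [List.getElem?_append_right (by omega)]
      congr 1
      omega
    · rw [List.getElem?_eq_none (by omega), List.getElem?_eq_none (by simp only [List.length_append]; omega)]
  · rw [PySem.List.pyGet?_neg row (by omega) (by omega)]
    rw [List.getElem?_append (l₁ := row) (l₂ := row)]
    rw [if_pos (by omega)]
    congr 1
    omega

-- reference scan through a spec list
theorem pvScan_of_spec (s : List Int) (row : List Int) (v x : Int)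
    (hspec : ∀ i : Nat, PySem.List.pyGet? row (x + (i : Int)) = s[i]?)
    (hne : pvDW v s ≠ []) :
    pvScan row v x = x + ((pvTW v s).length : Int) := by
  unfold pvTW pvDW at *
  induction s generalizing x with
  | nil => simp at hne
  | cons a s ih =>
    have h0 : PySem.List.pyGet? row x = some a := by
      have := hspec 0
      simpa using this
    by_cases hav : a = v
    · subst hav
      rw [pvScan_next _ _ _ h0]
      have hspec' : ∀ i : Nat, PySem.List.pyGet? row ((x + 1) + (i : Int)) = s[i]? := by
        intro i
        have := hspec (i + 1)
        simp only [List.getElem?_cons_succ] at this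
        rw [← this]
        congr 1
        push_cast
        ring
      have hne' : s.dropWhile (· == a) ≠ [] := by
        rw [List.dropWhile_cons, if_pos (by simp)] at hne
        exact hne
      rw [ih (x + 1) hspec' hne']
      rw [List.takeWhile_cons, if_pos (by simp)]
      simp only [List.length_cons]
      push_cast
      ring
    · rw [pvScan_stop _ _ _ (by rw [h0]; simp [hav])]
      rw [List.takeWhile_cons, if_neg (by simp [hav])]
      simp

-- spec list survives dropping a prefix
theorem pvSpec_drop (s : List Int) (row : List Int) (x : Int)
    (hspec : ∀ i : Nat, PySem.List.pyGet? row (x + (i : Int)) = s[i]?) (k : Nat) :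
    ∀ i : Nat, PySem.List.pyGet? row ((x + (k : Int)) + (i : Int)) = (s.drop k)[i]? := by
  intro i
  rw [List.getElem?_drop, ← hspec (k + i)]
  congr 1
  push_cast
  ring

-- dropWhile is a drop
theorem pvDW_eq_drop (v : Int) (l : List Int) : pvDW v l = l.drop (pvTW v l).length := by
  unfold pvTW pvDW
  induction l with
  | nil => rfl
  | cons a l ih =>
    rw [List.takeWhile_cons, List.dropWhile_cons]
    split_ifs with h
    · simpa using ih
    · simp

theorem pvLen_TW_DW (v : Int) (l : List Int) :
    (pvTW v l).length + (pvDW v l).length = l.length := by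
  unfold pvTW pvDW
  rw [← List.length_append, List.takeWhile_append_dropWhile]

-- A's full characterization on pvD
theorem pvA_char (image : List (List Int)) (x y : Int)
    (hx : PySem.Raise.InRange ((PySem.List.pyGet? image y).getD []).length x)
    (hr : pvDW 255 (pvDW 0 (pvDW 255 (pvD ((PySem.List.pyGet? image y).getD []) x))) ≠ []) :
    read_lguard image x y
      = (x + ((pvTW 255 (pvD ((PySem.List.pyGet? image y).getD []) x)).length : Int)
           + ((pvTW 0 (pvDW 255 (pvD ((PySem.List.pyGet? image y).getD []) x))).length : Int)
           + ((pvTW 255 (pvDW 0 (pvDW 255 (pvD ((PySem.List.pyGet? image y).getD []) x)))).length : Int),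
         ((pvTW 255 (pvD ((PySem.List.pyGet? image y).getD []) x)).length : Int)) := by
  rw [pvA_scan]
  have hne1 : pvDW 255 (pvD ((PySem.List.pyGet? image y).getD []) x) ≠ [] := by
    intro e; rw [e] at hr; exact hr rfl
  have hne2 : pvDW 0 (pvDW 255 (pvD ((PySem.List.pyGet? image y).getD []) x)) ≠ [] := by
    intro e; rw [e] at hr; exact hr rfl
  have spec0 := pvGet_shift ((PySem.List.pyGet? image y).getD []) x hx
  have s1 := pvScan_of_spec (pvD ((PySem.List.pyGet? image y).getD []) x)
    ((PySem.List.pyGet? image y).getD []) 255 x spec0 hne1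
  have spec1 : ∀ i : Nat, PySem.List.pyGet? ((PySem.List.pyGet? image y).getD [])
      ((x + ((pvTW 255 (pvD ((PySem.List.pyGet? image y).getD []) x)).length : Int)) + (i : Int))
      = (pvDW 255 (pvD ((PySem.List.pyGet? image y).getD []) x))[i]? := by
    intro i
    rw [pvDW_eq_drop]
    exact pvSpec_drop _ _ x spec0 _ i
  have s2 := pvScan_of_spec (pvDW 255 (pvD ((PySem.List.pyGet? image y).getD []) x))
    ((PySem.List.pyGet? image y).getD []) 0 _ spec1 hne2
  have spec2 : ∀ i : Nat, PySem.List.pyGet? ((PySem.List.pyGet? image y).getD [])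
      (((x + ((pvTW 255 (pvD ((PySem.List.pyGet? image y).getD []) x)).length : Int))
          + ((pvTW 0 (pvDW 255 (pvD ((PySem.List.pyGet? image y).getD []) x))).length : Int)) + (i : Int))
      = (pvDW 0 (pvDW 255 (pvD ((PySem.List.pyGet? image y).getD []) x)))[i]? := by
    intro i
    rw [pvDW_eq_drop (v := 0)]
    exact pvSpec_drop _ _ _ spec1 _ i
  have s3 := pvScan_of_spec (pvDW 0 (pvDW 255 (pvD ((PySem.List.pyGet? image y).getD []) x)))
    ((PySem.List.pyGet? image y).getD []) 255 _ spec2 hr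
  rw [s1, s2, s3]
  simp only [Prod.mk.injEq]
  exact ⟨trivial, by omega⟩

-- -------- B-side characterization --------

theorem pvRleF_ne_nil (r : List (Int × Int)) (v : Int) : pvRleF r v ≠ [] := by
  unfold pvRleF
  cases hl : r.getLast? with
  | none => simp
  | some uc =>
    obtain ⟨u, c⟩ := uc
    dsimp only
    split_ifs <;> simp

theorem pvRleF_append (r1 r2 : List (Int × Int)) (v : Int) (h : r2 ≠ []) :
    pvRleF (r1 ++ r2) v = r1 ++ pvRleF r2 v := by
  unfold pvRleF
  rw [List.getLast?_append]
  cases hl : r2.getLast? with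
  | none => exact absurd (List.getLast?_eq_none_iff.mp hl) h
  | some uc =>
    obtain ⟨u, c⟩ := uc
    simp only [Option.some_or]
    split_ifs
    · rw [List.dropLast_append_of_ne_nil h, List.append_assoc]
    · rw [List.append_assoc]

theorem pvRle_aux1 (s : List Int) (r1 r2 : List (Int × Int)) (h : r2 ≠ []) :
    s.foldl pvRleF (r1 ++ r2) = r1 ++ s.foldl pvRleF r2 := by
  induction s generalizing r2 with
  | nil => simp
  | cons v s ih =>
    simp only [List.foldl_cons]
    rw [pvRleF_append r1 r2 v h]
    exact ih (pvRleF r2 v) (pvRleF_ne_nil r2 v)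

theorem pvRle_single (s : List Int) (u : Int) (c : Int) :
    s.foldl pvRleF [(u, c)]
      = (u, c + ((pvTW u s).length : Int)) :: pvRle (pvDW u s) := by
  unfold pvTW pvDW
  induction s generalizing c with
  | nil => simp [pvRle]
  | cons a s ih =>
    simp only [List.foldl_cons]
    by_cases hau : u = a
    · subst hau
      have hstep : pvRleF [(u, c)] u = [(u, c + 1)] := by
        unfold pvRleF
        simp
      rw [hstep, ih (c + 1)]
      rw [List.takeWhile_cons, if_pos (by simp), List.dropWhile_cons, if_pos (by simp)]
      simp only [List.length_cons]
      push_cast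
      ring_nf
    · have hstep : pvRleF [(u, c)] a = [(u, c)] ++ [(a, 1)] := by
        unfold pvRleF
        simp [hau]
      rw [hstep, pvRle_aux1 s [(u, c)] [(a, 1)] (by simp)]
      rw [List.takeWhile_cons, if_neg (by simp [Ne.symm hau]),
        List.dropWhile_cons, if_neg (by simp [Ne.symm hau])]
      simp only [List.length_nil, Nat.cast_zero, add_zero,
        List.cons_append, List.nil_append, List.cons.injEq, true_and]
      rfl

theorem pvRle_cons (a : Int) (s : List Int) :
    pvRle (a :: s) = (a, 1 + ((pvTW a s).length : Int)) :: pvRle (pvDW a s) := by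
  show (a :: s).foldl pvRleF [] = _
  simp only [List.foldl_cons]
  have h0 : pvRleF [] a = [(a, 1)] := by unfold pvRleF; simp
  rw [h0, pvRle_single s a 1]

theorem pvTW_idem (v : Int) (l : List Int) : pvTW v (pvTW v l) = pvTW v l := by
  unfold pvTW
  induction l with
  | nil => rfl
  | cons a l ih =>
    rw [List.takeWhile_cons]
    split_ifs with h
    · rw [List.takeWhile_cons, if_pos h, ih]
    · rfl

theorem pvDW_TW (v : Int) (l : List Int) : pvDW v (pvTW v l) = [] := by
  unfold pvTW pvDW
  induction l with
  | nil => rfl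
  | cons a l ih =>
    rw [List.takeWhile_cons]
    split_ifs with h
    · rw [List.dropWhile_cons, if_pos h, ih]
    · rfl

theorem pvRle_split (e : Int) (s : List Int) :
    pvRle s = pvRle (pvTW e s) ++ pvRle (pvDW e s) := by
  cases s with
  | nil => rfl
  | cons a s =>
    by_cases hae : (a == e) = true
    · have ha : a = e := by simpa using hae
      subst ha
      have htw : pvTW a (a :: s) = a :: pvTW a s := by
        unfold pvTW
        rw [List.takeWhile_cons, if_pos (by simp)]
      have hdw : pvDW a (a :: s) = pvDW a s := by
        unfold pvDW
        rw [List.dropWhile_cons, if_pos (by simp)]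
      rw [htw, hdw, pvRle_cons a s, pvRle_cons a (pvTW a s)]
      rw [pvTW_idem, pvDW_TW]
      show _ = ((a, 1 + ((pvTW a s).length : Int)) :: ([] : List Int).foldl pvRleF []) ++ _
      simp
    · have htw : pvTW e (a :: s) = [] := by
        unfold pvTW
        rw [List.takeWhile_cons, if_neg hae]
      have hdw : pvDW e (a :: s) = a :: s := by
        unfold pvDW
        rw [List.dropWhile_cons, if_neg hae]
      rw [htw, hdw]
      rfl

theorem pvConsume_eq (pre : List (Int × Int)) (s : List Int) (pos first i e : Int) :
    pvConsume (pre ++ pvRle s) (pre.length, pos, first) (i, e)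
      = ((pre ++ pvRle (pvTW e s)).length,
         pos + ((pvTW e s).length : Int),
         if i = 0 ∧ pvTW e s ≠ [] then ((pvTW e s).length : Int) else first) := by
  cases s with
  | nil =>
    unfold pvConsume pvTW
    have : pvRle [] = [] := rfl
    simp [this]
  | cons a s =>
    by_cases hae : a = e
    · subst hae
      have htw : pvTW a (a :: s) = a :: pvTW a s := by
        unfold pvTW
        rw [List.takeWhile_cons, if_pos (by simp)]
      rw [pvRle_cons a s, htw]
      have hrle : pvRle (a :: pvTW a s) = [(a, 1 + ((pvTW a s).length : Int))] := by
        rw [pvRle_cons a (pvTW a s), pvTW_idem, pvDW_TW]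
        rfl
      rw [hrle]
      have hget : (pre ++ (a, 1 + ((pvTW a s).length : Int)) :: pvRle (pvDW a s)).getD
          pre.length (0, 0) = (a, 1 + ((pvTW a s).length : Int)) := by
        rw [List.getD_eq_getElem?_getD, List.getElem?_append_right (le_refl _)]
        simp
      unfold pvConsume
      rw [if_pos ?hc]
      case hc =>
        refine ⟨by simp, ?_⟩
        rw [hget]
      · simp only [hget]
        simp only [Prod.mk.injEq]
        refine ⟨by simp, by simp only [List.length_cons]; push_cast; ring, ?_⟩
        by_cases hi : i = 0
        · rw [if_pos hi, if_pos ⟨hi, by simp⟩]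
          simp only [List.length_cons]
          push_cast
          ring
        · rw [if_neg hi, if_neg (by simp [hi])]
    · have htw : pvTW e (a :: s) = [] := by
        unfold pvTW
        rw [List.takeWhile_cons, if_neg (by simp [hae])]
      rw [htw, pvRle_cons a s]
      have hget : (pre ++ (a, 1 + ((pvTW a s).length : Int)) :: pvRle (pvDW a s)).getD
          pre.length (0, 0) = (a, 1 + ((pvTW a s).length : Int)) := by
        rw [List.getD_eq_getElem?_getD, List.getElem?_append_right (le_refl _)]
        simp
      unfold pvConsume
      rw [if_neg ?hc]
      case hc =>
        rw [hget]
        simp [hae]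
      · have h0 : pvRle [] = ([] : List (Int × Int)) := rfl
        simp [h0]

-- B's full characterization on seq = row[x:]
theorem pvB_char (image : List (List Int)) (x y : Int) :
    read_lguard_alt image x y
      = (x + ((pvTW 255 (PySem.List.slice ((PySem.List.pyGet? image y).getD []) (some x) none)).length : Int)
           + ((pvTW 0 (pvDW 255 (PySem.List.slice ((PySem.List.pyGet? image y).getD []) (some x) none))).length : Int)
           + ((pvTW 255 (pvDW 0 (pvDW 255 (PySem.List.slice ((PySem.List.pyGet? image y).getD []) (some x) none)))).length : Int),
         ((pvTW 255 (PySem.List.slice ((PySem.List.pyGet? image y).getD []) (some x) none)).length : Int)) := by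
  unfold read_lguard_alt
  have he : PySem.List.enumerate [(255 : Int), 0, 255] 0
      = [((0 : Int), (255 : Int)), (1, 0), (2, 255)] := by decide
  simp only [he, List.foldl_cons, List.foldl_nil]
  have e1 := pvConsume_eq [] (PySem.List.slice ((PySem.List.pyGet? image y).getD []) (some x) none) x 0 0 255
  simp only [List.nil_append, List.length_nil] at e1
  rw [e1]
  simp only [true_and]
  have hf1 : (if pvTW 255 (PySem.List.slice ((PySem.List.pyGet? image y).getD []) (some x) none) ≠ []
      then ((pvTW 255 (PySem.List.slice ((PySem.List.pyGet? image y).getD []) (some x) none)).length : Int) else 0)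
      = ((pvTW 255 (PySem.List.slice ((PySem.List.pyGet? image y).getD []) (some x) none)).length : Int) := by
    split_ifs with h
    · rfl
    · rw [not_ne_iff] at h
      rw [h]
      simp
  rw [hf1]
  have e2 := pvConsume_eq (pvRle (pvTW 255 (PySem.List.slice ((PySem.List.pyGet? image y).getD []) (some x) none)))
    (pvDW 255 (PySem.List.slice ((PySem.List.pyGet? image y).getD []) (some x) none))
    (x + ((pvTW 255 (PySem.List.slice ((PySem.List.pyGet? image y).getD []) (some x) none)).length : Int))
    ((pvTW 255 (PySem.List.slice ((PySem.List.pyGet? image y).getD []) (some x) none)).length : Int) 1 0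
  rw [← pvRle_split 255] at e2
  rw [e2, if_neg (by simp)]
  have e3 := pvConsume_eq
    (pvRle (pvTW 255 (PySem.List.slice ((PySem.List.pyGet? image y).getD []) (some x) none))
      ++ pvRle (pvTW 0 (pvDW 255 (PySem.List.slice ((PySem.List.pyGet? image y).getD []) (some x) none))))
    (pvDW 0 (pvDW 255 (PySem.List.slice ((PySem.List.pyGet? image y).getD []) (some x) none)))
    ((x + ((pvTW 255 (PySem.List.slice ((PySem.List.pyGet? image y).getD []) (some x) none)).length : Int))
      + ((pvTW 0 (pvDW 255 (PySem.List.slice ((PySem.List.pyGet? image y).getD []) (some x) none))).length : Int))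
    ((pvTW 255 (PySem.List.slice ((PySem.List.pyGet? image y).getD []) (some x) none)).length : Int) 2 255
  rw [List.append_assoc, ← pvRle_split 0, ← pvRle_split 255] at e3
  rw [e3]
  split_ifs with h2
  · exact absurd h2.1 (by norm_num)
  · rfl

-- -------- bridging pvD and the slice --------

def pvChain (ps : List Int) (l : List Int) : List Int :=
  ps.foldl (fun acc v => pvDW v acc) l

theorem pvChain_nil_list (ps : List Int) : pvChain ps [] = [] := by
  induction ps with
  | nil => rfl
  | cons p ps ih => simpa [pvChain, List.foldl_cons, pvDW] using ih

theorem pvChain_cons (p : Int) (ps : List Int) (l : List Int) :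
    pvChain (p :: ps) l = pvChain ps (pvDW p l) := by
  rfl

theorem pvLen_chain_le (ps : List Int) (l : List Int) :
    (pvChain ps l).length ≤ l.length := by
  induction ps generalizing l with
  | nil => simp [pvChain]
  | cons p ps ih =>
    rw [pvChain_cons]
    exact le_trans (ih (pvDW p l)) (List.length_dropWhile_le _ _)

theorem pvTW_prefix (p : Int) (s t : List Int)
    (h : (pvTW p (s ++ t)).length ≤ s.length) :
    pvTW p (s ++ t) = pvTW p s ∧ pvDW p (s ++ t) = pvDW p s ++ t := by
  unfold pvTW pvDW at *
  induction s with
  | nil =>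
    simp only [List.nil_append, List.length_nil, Nat.le_zero,
      List.length_eq_zero_iff] at h
    refine ⟨by simpa using h, ?_⟩
    cases t with
    | nil => simp
    | cons b t =>
      rw [List.takeWhile_cons] at h
      simp only [List.dropWhile_nil, List.nil_append, List.dropWhile_cons]
      split_ifs at h ⊢ with hb
      all_goals simp_all
  | cons a s ih =>
    simp only [List.cons_append, List.takeWhile_cons, List.dropWhile_cons] at h ⊢
    split_ifs at h ⊢ with ha
    · simp only [List.length_cons] at h
      have := ih (by omega)
      simp [this.1, this.2]
    · simp

theorem pvTW_all (p : Int) (s t : List Int)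
    (h : s.length ≤ (pvTW p (s ++ t)).length) : pvTW p s = s := by
  unfold pvTW at *
  induction s with
  | nil => rfl
  | cons a s ih =>
    simp only [List.cons_append, List.takeWhile_cons] at h
    simp only [List.takeWhile_cons]
    split_ifs at h ⊢ with ha
    · simp only [List.length_cons] at h
      rw [ih (by omega)]
    · simp at h

theorem pvChain_gen2 (ps : List Int) (s t : List Int)
    (h : (pvChain ps (s ++ t)).length < t.length) :
    pvChain ps s = [] := by
  induction ps generalizing s t with
  | nil =>
    exfalso
    simp only [pvChain, List.foldl_nil, List.length_append] at h
    omega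
  | cons p ps ih =>
    rw [pvChain_cons] at h ⊢
    by_cases hc : (pvTW p (s ++ t)).length ≤ s.length
    · obtain ⟨-, h2⟩ := pvTW_prefix p s t hc
      rw [h2] at h
      exact ih _ _ h
    · have h1 := pvTW_all p s t (by omega)
      have h2 := pvLen_TW_DW p s
      have h3 : pvDW p s = [] := by
        have h4 : (pvTW p s).length = s.length := by rw [h1]
        exact List.length_eq_zero_iff.mp (by omega)
      rw [h3, pvChain_nil_list]

-- ===== VERDICT (by name: the statements are the Claim_ definitions above) =====
theorem pvStage (s t : List Int) (v : Int) (rest : List Int)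
    (hge : t.length ≤ (pvChain (v :: rest) (s ++ t)).length) :
    pvTW v (s ++ t) = pvTW v s ∧ pvDW v (s ++ t) = pvDW v s ++ t ∧
      t.length ≤ (pvChain rest (pvDW v s ++ t)).length := by
  have h1 : pvChain (v :: rest) (s ++ t) = pvChain rest (pvDW v (s ++ t)) := rfl
  have h2 := pvLen_chain_le rest (pvDW v (s ++ t))
  have h3 := pvLen_TW_DW v (s ++ t)
  have hlen : (s ++ t).length = s.length + t.length := by simp
  have h1l : (pvChain (v :: rest) (s ++ t)).length
      = (pvChain rest (pvDW v (s ++ t))).length := congrArg List.length h1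
  have hb : (pvTW v (s ++ t)).length ≤ s.length := by omega
  obtain ⟨htw, hdw⟩ := pvTW_prefix v s t hb
  refine ⟨htw, hdw, ?_⟩
  rw [h1, hdw] at hge
  exact hge

theorem read_lguard_spec : Claim_unchanged_read_lguard := by
  intro image x y _ hpre hnd
  obtain ⟨hy, hx, hr⟩ := hpre
  have hr' : pvDW 255 (pvDW 0 (pvDW 255 (pvD ((PySem.List.pyGet? image y).getD []) x))) ≠ [] := hr
  show read_lguard image x y = read_lguard_alt image x y
  rw [pvA_char image x y hx hr', pvB_char image x y]
  obtain ⟨hx1, hx2⟩ := hx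
  by_cases hx0 : 0 ≤ x
  · have hseq : PySem.List.slice ((PySem.List.pyGet? image y).getD []) (some x) none
        = pvD ((PySem.List.pyGet? image y).getD []) x := by
      rw [PySem.List.slice_some_none]
      unfold pvD PySem.List.clampIdx
      rw [if_neg (by omega), min_eq_left (by omega)]
      have h2 : (x + (((PySem.List.pyGet? image y).getD []).length : Int)).toNat
          = ((PySem.List.pyGet? image y).getD []).length + x.toNat := by omega
      have e1 : List.drop (((PySem.List.pyGet? image y).getD []).length + x.toNat)
          ((PySem.List.pyGet? image y).getD []) = [] :=
        List.drop_eq_nil_of_le (by omega)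
      have e2 : ((PySem.List.pyGet? image y).getD []).length + x.toNat
          - ((PySem.List.pyGet? image y).getD []).length = x.toNat := by omega
      rw [h2, List.drop_append, e1, e2, List.nil_append]
    rw [hseq]
  · push_neg at hx0
    have hm : PySem.List.clampIdx ((PySem.List.pyGet? image y).getD []).length x
        = (x + (((PySem.List.pyGet? image y).getD []).length : Int)).toNat := by
      unfold PySem.List.clampIdx
      rw [if_pos hx0, if_neg (by omega)]
      omega
    have hseq : PySem.List.slice ((PySem.List.pyGet? image y).getD []) (some x) none
        = ((PySem.List.pyGet? image y).getD []).drop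
            (x + (((PySem.List.pyGet? image y).getD []).length : Int)).toNat := by
      rw [PySem.List.slice_some_none, hm]
    have hd : pvD ((PySem.List.pyGet? image y).getD []) x
        = PySem.List.slice ((PySem.List.pyGet? image y).getD []) (some x) none
            ++ (PySem.List.pyGet? image y).getD [] := by
      unfold pvD
      rw [hseq, List.drop_append_of_le_length (by omega)]
    have hge : ¬ ((pvDW 255 (pvDW 0 (pvDW 255 (pvD ((PySem.List.pyGet? image y).getD []) x)))).length
        < ((PySem.List.pyGet? image y).getD []).length) := by
      intro hlt
      refine hnd ?_
      unfold D_read_lguard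
      exact ⟨hx0, hy, ⟨hx1, hx2⟩, hlt⟩
    rw [hd] at hge
    rw [hd]
    have hgeN : ((PySem.List.pyGet? image y).getD []).length
        ≤ (pvChain [255, 0, 255]
            (PySem.List.slice ((PySem.List.pyGet? image y).getD []) (some x) none
              ++ (PySem.List.pyGet? image y).getD [])).length := by
      have h1 : pvChain [255, 0, 255]
          (PySem.List.slice ((PySem.List.pyGet? image y).getD []) (some x) none
            ++ (PySem.List.pyGet? image y).getD [])
          = pvDW 255 (pvDW 0 (pvDW 255
              (PySem.List.slice ((PySem.List.pyGet? image y).getD []) (some x) none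
                ++ (PySem.List.pyGet? image y).getD []))) := rfl
      rw [h1]
      omega
    obtain ⟨htw1, hdw1, hge1⟩ := pvStage _ _ 255 [0, 255] hgeN
    obtain ⟨htw2, hdw2, hge2⟩ := pvStage _ _ 0 [255] hge1
    obtain ⟨htw3, -, -⟩ := pvStage _ _ 255 [] hge2
    rw [htw1, hdw1, htw2, hdw2, htw3]

theorem read_lguard_changed : Claim_changed_read_lguard := by
  unfold Claim_changed_read_lguard
  refine ⟨by decide, by decide, by decide, ?_, by decide, by decide⟩
  show read_lguard [[0, 7, 255]] (-1) 0 = ((1 : Int), (1 : Int))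
  rw [pvA_char [[0, 7, 255]] (-1) 0 (by decide) (by decide)]
  decide

theorem read_lguard_tight : Claim_exact_read_lguard := by
  intro image x y _ hpre hd
  obtain ⟨hy, hx, hr⟩ := hpre
  obtain ⟨hx0, -, -, hlt⟩ := hd
  have hr' : pvDW 255 (pvDW 0 (pvDW 255 (pvD ((PySem.List.pyGet? image y).getD []) x))) ≠ [] := hr
  have hlt' : (pvDW 255 (pvDW 0 (pvDW 255 (pvD ((PySem.List.pyGet? image y).getD []) x)))).length
      < ((PySem.List.pyGet? image y).getD []).length := hlt
  obtain ⟨hx1, hx2⟩ := hx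
  rw [pvA_char image x y ⟨hx1, hx2⟩ hr', pvB_char image x y]
  have hm : PySem.List.clampIdx ((PySem.List.pyGet? image y).getD []).length x
      = (x + (((PySem.List.pyGet? image y).getD []).length : Int)).toNat := by
    unfold PySem.List.clampIdx
    rw [if_pos hx0, if_neg (by omega)]
    omega
  have hseq : PySem.List.slice ((PySem.List.pyGet? image y).getD []) (some x) none
      = ((PySem.List.pyGet? image y).getD []).drop
          (x + (((PySem.List.pyGet? image y).getD []).length : Int)).toNat := by
    rw [PySem.List.slice_some_none, hm]
  have hdq : pvD ((PySem.List.pyGet? image y).getD []) x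
      = PySem.List.slice ((PySem.List.pyGet? image y).getD []) (some x) none
          ++ (PySem.List.pyGet? image y).getD [] := by
    unfold pvD
    rw [hseq, List.drop_append_of_le_length (by omega)]
  have hlenL : ((PySem.List.slice ((PySem.List.pyGet? image y).getD []) (some x) none).length : Int)
      = -x := by
    rw [hseq, List.length_drop]
    omega
  have hchS : pvDW 255 (pvDW 0 (pvDW 255
      (PySem.List.slice ((PySem.List.pyGet? image y).getD []) (some x) none))) = [] := by
    have h0 : pvChain [255, 0, 255]
        (PySem.List.slice ((PySem.List.pyGet? image y).getD []) (some x) none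
          ++ (PySem.List.pyGet? image y).getD [])
        = pvDW 255 (pvDW 0 (pvDW 255 (pvD ((PySem.List.pyGet? image y).getD []) x))) := by
      rw [hdq]
      rfl
    have := pvChain_gen2 [255, 0, 255]
      (PySem.List.slice ((PySem.List.pyGet? image y).getD []) (some x) none)
      ((PySem.List.pyGet? image y).getD [])
      (by rw [h0]; omega)
    exact this
  rw [hdq] at hlt'
  rw [hdq]
  intro heq
  rw [Prod.mk.injEq] at heq
  obtain ⟨h1, -⟩ := heq
  have F1 := pvLen_TW_DW 255 (PySem.List.slice ((PySem.List.pyGet? image y).getD []) (some x) none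
      ++ (PySem.List.pyGet? image y).getD [])
  have F2 := pvLen_TW_DW 0 (pvDW 255 (PySem.List.slice ((PySem.List.pyGet? image y).getD []) (some x) none
      ++ (PySem.List.pyGet? image y).getD []))
  have F3 := pvLen_TW_DW 255 (pvDW 0 (pvDW 255 (PySem.List.slice ((PySem.List.pyGet? image y).getD []) (some x) none
      ++ (PySem.List.pyGet? image y).getD [])))
  have G1 := pvLen_TW_DW 255 (PySem.List.slice ((PySem.List.pyGet? image y).getD []) (some x) none)
  have G2 := pvLen_TW_DW 0 (pvDW 255 (PySem.List.slice ((PySem.List.pyGet? image y).getD []) (some x) none))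
  have G3 := pvLen_TW_DW 255 (pvDW 0 (pvDW 255 (PySem.List.slice ((PySem.List.pyGet? image y).getD []) (some x) none)))
  have hchS0 : (pvDW 255 (pvDW 0 (pvDW 255
      (PySem.List.slice ((PySem.List.pyGet? image y).getD []) (some x) none)))).length = 0 := by
    rw [hchS]
    rfl
  have hlapp : (PySem.List.slice ((PySem.List.pyGet? image y).getD []) (some x) none
      ++ (PySem.List.pyGet? image y).getD []).length
      = (PySem.List.slice ((PySem.List.pyGet? image y).getD []) (some x) none).length
        + ((PySem.List.pyGet? image y).getD []).length := by
    simp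
  omega
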